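-- pv_equiv track=rewrite | github.com/callambulance/music_library | music_reports.py | get_genre_stats
-- ===== SOURCE A (Python) =====
-- def get_genre_stats(albums):
--
--     dict_of_albums = {}
--
--     for album in albums:
--         if album[3] not in dict_of_albums.keys():
--             dict_of_albums[album[3]] = 1
--         elif album[3] in dict_of_albums.keys():
--             dict_of_albums[album[3]] += 1
--
--     return dict_of_albums
--     """
--     Get albums' statistics showing how many albums are in each genre
--     Example: { 'pop': 2, 'hard rock': 3, 'folk': 20, 'rock': 42 }
--
--     :param list albums: albums' data
--     :returns: genre stats
--     :rtype: dict
--     """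
-- ===== SOURCE B (Python) =====
-- def get_genre_stats(albums):
--     genres = [album[3] for album in albums]
--     return {genre: genres.count(genre) for genre in dict.fromkeys(genres)}
-- ===== Notes on version B (the rewrite author's own statement) =====
-- stated objective: simpler
-- what changed: Replaces the running-tally-in-a-dict loop (membership test, insert-1 / increment branches) by a two-pass comprehension: collect the genre column, dedup it in first-appearance order with dict.fromkeys, and count each distinct genre with list.count.
import Mathlib
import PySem

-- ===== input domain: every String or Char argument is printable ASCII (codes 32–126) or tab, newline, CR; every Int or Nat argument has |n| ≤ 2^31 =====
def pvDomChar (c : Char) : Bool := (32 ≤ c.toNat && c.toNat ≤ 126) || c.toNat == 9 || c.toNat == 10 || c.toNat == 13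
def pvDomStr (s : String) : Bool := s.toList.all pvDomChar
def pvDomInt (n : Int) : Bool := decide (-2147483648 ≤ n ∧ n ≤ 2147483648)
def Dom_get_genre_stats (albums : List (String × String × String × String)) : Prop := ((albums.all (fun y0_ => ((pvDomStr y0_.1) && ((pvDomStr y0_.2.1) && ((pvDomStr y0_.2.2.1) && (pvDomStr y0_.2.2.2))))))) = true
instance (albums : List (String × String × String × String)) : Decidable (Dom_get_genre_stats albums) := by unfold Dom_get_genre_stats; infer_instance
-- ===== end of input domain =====

-- ===== PORT A =====
-- B replaces the running tally by dedup-then-count; same return value, same key order (first appearance).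
def get_genre_stats (albums : List (String × String × String × String)) : List (String × Int) :=
  (albums.foldl (fun d album =>
      if PySem.Dict.contains d album.2.2.2 = false then
        PySem.Dict.insert d album.2.2.2 1
      else if PySem.Dict.contains d album.2.2.2 = true then
        PySem.Dict.modify d album.2.2.2 0 (· + 1)
      else d)
    PySem.Dict.empty).items

-- ===== PORT B =====
def get_genre_stats_alt (albums : List (String × String × String × String)) : List (String × Int) :=
  let genres := albums.map (fun album => album.2.2.2)
  ((PySem.List.dedup genres).foldl
      (fun d genre => PySem.Dict.insert d genre (genres.count genre : Int))
    PySem.Dict.empty).items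

-- ===== PRECONDITION & SPEC =====
def Spec_get_genre_stats (albums : List (String × String × String × String)) (out : List (String × Int)) : Prop := out = get_genre_stats_alt albums
instance (albums : List (String × String × String × String)) (out : List (String × Int)) : Decidable (Spec_get_genre_stats albums out) := by unfold Spec_get_genre_stats; infer_instance

-- ===== CLAIM (what is proved, stated in full; the proofs are below) =====
def Claim_equal_get_genre_stats : Prop := ∀ (albums : List (String × String × String × String)), Dom_get_genre_stats albums → Spec_get_genre_stats albums (get_genre_stats albums)

-- ===== LEMMAS AND PROOFS =====

-- A's loop step is exactly the Counter step: both branches coincide with modify _ 0 (+1).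
theorem stepA_eq_counter_step (d : PySem.Dict String Int) (k : String) :
    (if PySem.Dict.contains d k = false then PySem.Dict.insert d k 1
     else if PySem.Dict.contains d k = true then PySem.Dict.modify d k 0 (· + 1)
     else d) = PySem.Dict.modify d k 0 (· + 1) := by
  by_cases h : PySem.Dict.contains d k = true
  · simp [h]
  · have hc : PySem.Dict.contains d k = false := eq_false_of_ne_true h
    have hg : PySem.Dict.getD d k 0 = 0 := PySem.Dict.getD_of_not_contains d 0 hc
    apply PySem.Dict.ext
    simp only [PySem.Dict.modify, PySem.Dict.insert, PySem.Dict.contains] at hc ⊢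
    simp [hc, hg]

-- ===== VERDICT (by name: the statement is the Claim_ definition above) =====
theorem get_genre_stats_spec : Claim_equal_get_genre_stats := by
  intro albums _
  unfold Spec_get_genre_stats get_genre_stats get_genre_stats_alt
  have hA : albums.foldl (fun d album =>
      if PySem.Dict.contains d album.2.2.2 = false then
        PySem.Dict.insert d album.2.2.2 1
      else if PySem.Dict.contains d album.2.2.2 = true then
        PySem.Dict.modify d album.2.2.2 0 (· + 1)
      else d) PySem.Dict.empty
      = PySem.Dict.counter (albums.map (fun album => album.2.2.2)) := by
    rw [PySem.Dict.counter_eq_foldl, List.foldl_map]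
    exact PySem.List.foldl_congr_mem albums _ _ _ (fun d a _ => stepA_eq_counter_step d a.2.2.2)
  rw [hA, PySem.Dict.items_counter]
  rw [PySem.Dict.items_foldl_insert_fresh
        (PySem.List.dedup (albums.map (fun album => album.2.2.2))) (fun g => g) _ _
        (fun g _ => PySem.Dict.contains_empty g)
        (by simp)]
  simp [PySem.Dict.empty, PySem.List.dedup_eq_ofList]
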